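-- pv_equiv track=rewrite | github.com/Khamel83/atlas-coder | dspy_core/optimization.py | batch_similar_tasks
-- ===== SOURCE A (Python) =====
-- from typing import Dict, Any, List, Optional, Tuple
--
-- def batch_similar_tasks(tasks: List[Dict[str, Any]]) -> List[List[Dict[str, Any]]]:
--     """Group related tasks to reduce context switching costs"""
--     if not tasks:
--         return []
--
--     # Group by task type and similarity
--     task_groups = {}
--
--     for task in tasks:
--         task_type = task.get('type', 'general')
--         signature = task.get('signature', 'default')
--
--         key = f"{task_type}_{signature}"
--         if key not in task_groups:
--             task_groups[key] = []
--         task_groups[key].append(task)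
--
--     # Convert to list of batches
--     batches = []
--     for group in task_groups.values():
--         # Split large groups into manageable batches (max 5 tasks per batch)
--         for i in range(0, len(group), 5):
--             batches.append(group[i:i+5])
--
--     return batches
-- ===== SOURCE B (Python) =====
-- from typing import Dict, Any, List
--
-- def batch_similar_tasks(tasks: List[Dict[str, Any]]) -> List[List[Dict[str, Any]]]:
--     """Group related tasks to reduce context switching costs (single-pass batching)."""
--     batches_by_key = {}
--     for task in tasks:
--         key = f"{task.get('type', 'general')}_{task.get('signature', 'default')}"
--         bs = batches_by_key.setdefault(key, [])
--         if not bs or len(bs[-1]) == 5: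
--             bs.append([task])
--         else:
--             bs[-1].append(task)
--     return [batch for bs in batches_by_key.values() for batch in bs]
-- ===== Notes on version B (the rewrite author's own statement) =====
-- stated objective: alternative
-- what changed: Instead of first collecting full per-key groups in a dict and then chunking each group by range-slicing in a second phase, B does one pass that maintains per-key lists of batches directly (start a new batch when the key's last batch has 5 tasks) and flattens them at the end.
import Mathlib
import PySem

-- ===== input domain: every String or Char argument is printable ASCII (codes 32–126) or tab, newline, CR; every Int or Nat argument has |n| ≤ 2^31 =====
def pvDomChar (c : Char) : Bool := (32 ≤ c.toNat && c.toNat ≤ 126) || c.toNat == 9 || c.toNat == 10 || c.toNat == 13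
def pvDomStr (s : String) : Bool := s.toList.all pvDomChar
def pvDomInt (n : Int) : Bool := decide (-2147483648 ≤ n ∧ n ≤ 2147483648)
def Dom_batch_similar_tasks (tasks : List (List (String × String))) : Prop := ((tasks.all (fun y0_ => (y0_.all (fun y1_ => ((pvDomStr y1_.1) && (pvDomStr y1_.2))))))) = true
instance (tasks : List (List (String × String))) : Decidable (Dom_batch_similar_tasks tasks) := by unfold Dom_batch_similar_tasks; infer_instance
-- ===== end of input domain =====

-- B re-implements the group-then-chunk of A as a single pass that maintains per-key
-- lists of batches (new batch when the key's last batch holds 5) and flattens at the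
-- end; same cost, different decomposition (objective: alternative).

-- ===== PORT A =====
-- key = f"{task.get('type','general')}_{task.get('signature','default')}" (shared by both Pythons)
def pvKey (task : List (String × String)) : String :=
  ((PySem.Dict.mk task).getD "type" "general") ++ "_" ++ ((PySem.Dict.mk task).getD "signature" "default")

def batch_similar_tasks (tasks : List (List (String × String))) : List (List (List (String × String))) :=
  if tasks = [] then []
  else
    -- task_groups[key] = [] if absent; task_groups[key].append(task)
    let task_groups : PySem.Dict String (List (List (String × String))) :=
      tasks.foldl (fun d task => d.modify (pvKey task) [] (fun g => g ++ [task])) PySem.Dict.empty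
    -- for group in values: for i in range(0, len(group), 5): batches.append(group[i:i+5])
    task_groups.values.foldl (fun batches group =>
      (PySem.List.pyRange 0 (group.length : Int) 5).foldl
        (fun batches i => batches ++ [PySem.List.slice group (some i) (some (i + 5))]) batches) []

-- ===== PORT B =====
-- if not bs or len(bs[-1]) == 5: bs.append([task]) else: bs[-1].append(task)
def pvAddToBatches (bs : List (List (List (String × String)))) (t : List (String × String)) :
    List (List (List (String × String))) :=
  match bs with
  | [] => [[t]]
  | [b] => if b.length = 5 then [b, [t]] else [b ++ [t]]
  | b :: rest => b :: pvAddToBatches rest t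

def batch_similar_tasks_alt (tasks : List (List (String × String))) : List (List (List (String × String))) :=
  (tasks.foldl (fun d task => d.modify (pvKey task) [] (fun bs => pvAddToBatches bs task))
    (PySem.Dict.empty : PySem.Dict String (List (List (List (String × String)))))).values.flatten

-- ===== PRECONDITION & SPEC =====
def Spec_batch_similar_tasks (tasks : List (List (String × String))) (out : List (List (List (String × String)))) : Prop := out = batch_similar_tasks_alt tasks
instance (tasks : List (List (String × String))) (out : List (List (List (String × String)))) : Decidable (Spec_batch_similar_tasks tasks out) := by unfold Spec_batch_similar_tasks; infer_instance

-- ===== CLAIM (what is proved, stated in full; the proofs are below) =====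
def Claim_equal_batch_similar_tasks : Prop := ∀ (tasks : List (List (String × String))), Dom_batch_similar_tasks tasks → Spec_batch_similar_tasks tasks (batch_similar_tasks tasks)

-- ===== LEMMAS AND PROOFS =====

-- chunking a list into consecutive blocks of 5 (the reference shape both ports are reduced to)
def pvChunk5 {α : Type} : List α → List (List α)
  | [] => []
  | x :: xs => (x :: xs).take 5 :: pvChunk5 (xs.drop 4)
termination_by l => l.length
decreasing_by simp

theorem pvChunk5_nil {α : Type} : pvChunk5 (α := α) [] = [] := by rw [pvChunk5]

theorem pvChunk5_cons {α : Type} (x : α) (xs : List α) :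
    pvChunk5 (x :: xs) = (x :: xs).take 5 :: pvChunk5 ((x :: xs).drop 5) := by
  rw [pvChunk5]; norm_num

theorem pvChunk5_ne_nil {α : Type} (g : List α) (h : g ≠ []) : pvChunk5 g ≠ [] := by
  cases g with
  | nil => exact absurd rfl h
  | cons x xs => rw [pvChunk5_cons]; simp

-- the incremental step of B applied to the chunking of g extends g by one element
theorem pvAdd_chunk5 (g : List (List (String × String))) (t : List (String × String)) :
    pvAddToBatches (pvChunk5 g) t = pvChunk5 (g ++ [t]) := by
  induction g using pvChunk5.induct with
  | case1 => simp [pvChunk5_nil, pvChunk5_cons, pvAddToBatches]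
  | case2 x xs ih =>
    rw [pvChunk5_cons]
    by_cases hlen : (x :: xs).length ≤ 5
    · -- drop 5 is empty: a single chunk
      have hdrop : (x :: xs).drop 5 = [] := by
        apply List.drop_eq_nil_of_le; omega
      rw [hdrop, pvChunk5_nil]
      unfold pvAddToBatches
      by_cases h5 : (x :: xs).length = 5
      · have htake : (x :: xs).take 5 = x :: xs := List.take_of_length_le (by omega)
        simp only [htake, h5, if_pos]
        rw [List.cons_append, pvChunk5_cons]
        have h1 : (x :: (xs ++ [t])).take 5 = x :: xs := by
          rw [← List.cons_append, List.take_append_of_le_length (by omega), htake]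
        have h2 : (x :: (xs ++ [t])).drop 5 = [t] := by
          rw [← List.cons_append, List.drop_append_of_le_length (by omega), hdrop]; simp
        rw [h1, h2]
        simp [pvChunk5_cons, pvChunk5_nil]
      · have htake : (x :: xs).take 5 = x :: xs := List.take_of_length_le (by omega)
        have hx3 : xs.length ≤ 3 := by
          simp only [List.length_cons] at hlen h5; omega
        simp only [htake, if_neg h5]
        rw [List.cons_append, pvChunk5_cons]
        have h1 : (x :: (xs ++ [t])).take 5 = x :: xs ++ [t] := by
          apply List.take_of_length_le; simp; omega
        have h2 : (x :: (xs ++ [t])).drop 5 = [] := by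
          apply List.drop_eq_nil_of_le; simp; omega
        rw [h1, h2]
        simp [pvChunk5_nil]
    · -- drop 5 is nonempty: step recurses past the first chunk
      have hdropne : (x :: xs).drop 5 ≠ [] := by
        intro hc; have := List.drop_eq_nil_iff.mp hc; omega
      have hchne := pvChunk5_ne_nil _ hdropne
      have hstep : pvAddToBatches ((x :: xs).take 5 :: pvChunk5 ((x :: xs).drop 5)) t
          = (x :: xs).take 5 :: pvAddToBatches (pvChunk5 ((x :: xs).drop 5)) t := by
        cases hch : pvChunk5 ((x :: xs).drop 5) with
        | nil => exact absurd hch hchne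
        | cons c cs => rfl
      rw [hstep]
      have ih' : pvAddToBatches (pvChunk5 ((x :: xs).drop 5)) t = pvChunk5 ((x :: xs).drop 5 ++ [t]) := by
        simpa using ih
      rw [ih', List.cons_append, pvChunk5_cons]
      congr 1
      · rw [← List.cons_append, List.take_append_of_le_length (by omega)]
      · rw [← List.cons_append, List.drop_append_of_le_length (by omega)]

-- peeling one step-5 range element
theorem pvRange5_peel (n : Int) (h : 0 < n) :
    PySem.List.pyRange 0 n 5 = 0 :: (PySem.List.pyRange 0 (n - 5) 5).map (· + 5) := by
  rw [PySem.List.pyRange_of_pos 0 n (by norm_num), PySem.List.pyRange_of_pos 0 (n - 5) (by norm_num)]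
  by_cases h5 : 5 < n
  · rw [if_pos h, if_pos (by omega)]
    have he : ((n - 0 + 5 - 1) / 5).toNat = ((n - 5 - 0 + 5 - 1) / 5).toNat + 1 := by omega
    rw [he, List.range_succ_eq_map]
    simp only [List.map_cons, List.map_map]
    rw [List.map_congr_left (g := (fun x => x + 5) ∘ fun k : Nat => 0 + 5 * (k:Int))
      (by intro k _; simp only [Function.comp_apply]; push_cast; ring)]
    norm_num
  · rw [if_pos h, if_neg (by omega)]
    have he : ((n - 0 + 5 - 1) / 5).toNat = 1 := by omega
    rw [he]
    simp [List.range_succ]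

-- A's inner range/slice loop produces exactly the 5-chunks of the group
theorem pvInnerA (g : List (List (String × String))) (acc : List (List (List (String × String)))) :
    (PySem.List.pyRange 0 (g.length : Int) 5).foldl
      (fun batches i => batches ++ [PySem.List.slice g (some i) (some (i + 5))]) acc
    = acc ++ pvChunk5 g := by
  induction g using pvChunk5.induct generalizing acc with
  | case1 => simp [PySem.List.pyRange, pvChunk5_nil]
  | case2 x xs ih =>
    have hpos : (0 : Int) < ((x :: xs).length : Int) := by
      simp only [List.length_cons]; omega
    rw [pvRange5_peel _ hpos, List.foldl_cons, List.foldl_map]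
    have hslice0 : PySem.List.slice (x :: xs) (some 0) (some (0 + 5)) = (x :: xs).take 5 := by
      rw [show ((0:Int) + 5) = ((5:Nat):Int) by norm_num,
        show (0:Int) = ((0:Nat):Int) by norm_num, PySem.List.slice_natCast]
      simp
    have hrange : PySem.List.pyRange 0 (((x :: xs).length : Int) - 5) 5
        = PySem.List.pyRange 0 ((((x :: xs).drop 5).length : Int)) 5 := by
      by_cases hl : 5 ≤ xs.length + 1
      · congr 1
        simp only [List.length_drop, List.length_cons]
        omega
      · rw [PySem.List.pyRange_of_pos _ _ (by norm_num : (0:Int) < 5),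
          PySem.List.pyRange_of_pos _ _ (by norm_num : (0:Int) < 5),
          if_neg (by simp only [List.length_cons]; omega),
          if_neg (by simp only [List.length_drop, List.length_cons]; omega)]
    have hcongr : ∀ (b : List (List (List (String × String)))),
        ∀ i ∈ PySem.List.pyRange 0 (((x :: xs).drop 5).length : Int) 5,
        b ++ [PySem.List.slice (x :: xs) (some (i + 5)) (some (i + 5 + 5))]
        = b ++ [PySem.List.slice ((x :: xs).drop 5) (some i) (some (i + 5))] := by
      intro b i hi
      have hi' := (PySem.List.mem_pyRange_iff_of_pos (by norm_num) i).mp hi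
      have h0i : 0 ≤ i := hi'.1
      congr 2
      rw [PySem.List.slice_toNat _ (by omega) (by omega),
        PySem.List.slice_toNat _ (by omega) (by omega), List.drop_drop]
      congr 1
      · omega
      · congr 1; omega
    rw [hslice0, hrange, PySem.List.foldl_congr_mem _ _ _ _ hcongr]
    have ih' := fun acc' => ih acc'
    simp only at ih'
    rw [show (x :: xs).drop 5 = xs.drop 4 from rfl] at *
    rw [ih' (acc ++ [(x :: xs).take 5])]
    rw [pvChunk5_cons]
    simp

-- the grouping invariant: B's dict is A's dict with every value chunked
theorem pvDictInv (tasks : List (List (String × String)))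
    (dA : PySem.Dict String (List (List (String × String))))
    (dB : PySem.Dict String (List (List (List (String × String)))))
    (hinv : dB.items = dA.items.map (fun p => (p.1, pvChunk5 p.2))) :
    (tasks.foldl (fun d task => d.modify (pvKey task) [] (fun bs => pvAddToBatches bs task)) dB).items
    = ((tasks.foldl (fun d task => d.modify (pvKey task) [] (fun g => g ++ [task])) dA).items).map
        (fun p => (p.1, pvChunk5 p.2)) := by
  induction tasks generalizing dA dB with
  | nil => simpa using hinv
  | cons t ts ih =>
    simp only [List.foldl_cons]
    apply ih
    -- one modify step preserves the invariant
    have hget : dB.get? (pvKey t) = (dA.get? (pvKey t)).map pvChunk5 := by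
      unfold PySem.Dict.get?
      rw [hinv, List.find?_map]
      have hcomp : ((fun p => p.1 == pvKey t) ∘
          fun (p : String × List (List (String × String))) => (p.1, pvChunk5 p.2))
          = fun p => p.1 == pvKey t := rfl
      rw [hcomp]
      cases List.find? (fun p => p.1 == pvKey t) dA.items <;> simp
    have hgetD : dB.getD (pvKey t) [] = pvChunk5 (dA.getD (pvKey t) []) := by
      rw [PySem.Dict.getD_eq_get?_getD, PySem.Dict.getD_eq_get?_getD, hget]
      cases dA.get? (pvKey t) <;> simp [pvChunk5]
    have hcont : dB.contains (pvKey t) = dA.contains (pvKey t) := by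
      unfold PySem.Dict.contains
      rw [hinv, List.any_map]; rfl
    unfold PySem.Dict.modify
    rw [PySem.Dict.items_insert, PySem.Dict.items_insert, hcont]
    by_cases hc : dA.contains (pvKey t) = true
    · rw [if_pos hc, if_pos hc, hinv, List.map_map, List.map_map]
      refine List.map_congr_left ?_
      intro p _
      by_cases hp : (p.1 == pvKey t) = true
      · simp only [Function.comp, hp, if_pos]
        rw [hgetD, pvAdd_chunk5]
      · simp [Function.comp, hp]
    · rw [if_neg hc, if_neg hc, hinv, List.map_append]
      congr 1
      simp only [List.map_cons, List.map_nil]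
      rw [hgetD, pvAdd_chunk5]

-- ===== VERDICT (by name: the statement is the Claim_ definition above) =====
theorem batch_similar_tasks_spec : Claim_equal_batch_similar_tasks := by
  unfold Claim_equal_batch_similar_tasks
  intro tasks _
  unfold Spec_batch_similar_tasks batch_similar_tasks batch_similar_tasks_alt
  have hitems := pvDictInv tasks PySem.Dict.empty PySem.Dict.empty (by rfl)
  by_cases hnil : tasks = []
  · subst hnil; simp [PySem.Dict.empty, PySem.Dict.values]
  · rw [if_neg hnil]
    simp only []
    -- both sides in terms of A's groups
    set dA := tasks.foldl (fun d task => d.modify (pvKey task) [] (fun g => g ++ [task]))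
      (PySem.Dict.empty : PySem.Dict String (List (List (String × String)))) with hdA
    have hvals : (tasks.foldl (fun d task => d.modify (pvKey task) [] (fun bs => pvAddToBatches bs task))
        (PySem.Dict.empty : PySem.Dict String (List (List (List (String × String)))))).values
        = dA.values.map pvChunk5 := by
      unfold PySem.Dict.values
      rw [hitems, List.map_map, List.map_map]; rfl
    rw [hvals]
    -- outer loop of A = flatten of chunked groups
    have houter : ∀ (gs : List (List (List (String × String)))) (acc : List (List (List (String × String)))),
        gs.foldl (fun batches group =>
          (PySem.List.pyRange 0 (group.length : Int) 5).foldl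
            (fun batches i => batches ++ [PySem.List.slice group (some i) (some (i + 5))]) batches) acc
        = acc ++ (gs.map pvChunk5).flatten := by
      intro gs
      induction gs with
      | nil => simp
      | cons g gs ihg =>
        intro acc
        rw [List.foldl_cons, pvInnerA, ihg]
        simp
    rw [houter]
    simp
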